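-- pv_equiv track=rewrite | github.com/312spinstra/spinstragame | SPINSTRA_Game/utils.py | base36encode
-- ===== SOURCE A (Python) =====
-- def base36encode(number, alphabet='0123456789ABCDEFGHIJKLMNOPQRSTUVWXYZ'):
--     """Converts an integer to a base36 string."""
--     if not isinstance(number, int):
--         raise TypeError('number must be an integer')
--
--     base36 = ''
--     sign = ''
--
--     if number < 0:
--         sign = '-'
--         number = -number
--
--     if 0 <= number < len(alphabet):
--         return sign + alphabet[number]
--
--     while number != 0:
--         number, i = divmod(number, len(alphabet))
--         base36 = alphabet[i] + base36
--
--     return sign + base36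
-- ===== SOURCE B (Python) =====
-- def base36encode(number, alphabet='0123456789ABCDEFGHIJKLMNOPQRSTUVWXYZ'):
--     """Converts an integer to a base36 string."""
--     if not isinstance(number, int):
--         raise TypeError('number must be an integer')
--     if number < 0:
--         return '-' + base36encode(-number, alphabet)
--     if number < len(alphabet):
--         return alphabet[number]
--     return base36encode(number // len(alphabet), alphabet) + alphabet[number % len(alphabet)]
-- ===== Notes on version B (the rewrite author's own statement) =====
-- stated objective: simpler
-- what changed: Replaces the explicit while-loop with accumulator/prepend and separate sign handling by a direct recursive base conversion (divide by the base, recurse, append the digit), which also subsumes the 0/single-digit early return.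
-- outside the precondition, e.g. on base36encode(0, ''): A returns '', B raises ZeroDivisionError
import Mathlib
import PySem

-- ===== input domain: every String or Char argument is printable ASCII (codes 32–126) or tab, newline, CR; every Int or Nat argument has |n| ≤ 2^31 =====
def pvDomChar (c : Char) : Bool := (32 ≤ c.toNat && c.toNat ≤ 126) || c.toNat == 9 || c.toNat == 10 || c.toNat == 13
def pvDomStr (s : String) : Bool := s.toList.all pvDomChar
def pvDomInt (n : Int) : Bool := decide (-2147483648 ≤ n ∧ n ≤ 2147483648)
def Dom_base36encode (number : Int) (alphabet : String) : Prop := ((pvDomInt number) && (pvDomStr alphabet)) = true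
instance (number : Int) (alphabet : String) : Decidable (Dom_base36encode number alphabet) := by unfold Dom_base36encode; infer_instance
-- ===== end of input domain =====

-- B replaces A's while-loop/prepend and separate sign handling by a direct recursive base conversion (simpler decomposition).
-- Ports work over List Char (PySem.Chars model of Python str); alphabet[i] is exactly PySem.List.pyGet?.

-- ===== PORT A =====
-- alphabet[i] as a one-character string piece (i always in range on admitted inputs; [] = IndexError marker never hit inside Pre_)
def pvCharAt (cs : List Char) (i : Int) : List Char :=
  ((PySem.List.pyGet? cs i).map (fun c => [c])).getD []

-- A's while-loop: number, i = divmod(number, len); base36 = alphabet[i] + base36.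
-- Fuel only makes it total (the loop diverges in Python when len(alphabet) = 1, excluded by Pre_).
def pvALoop (cs : List Char) : Nat → Int → List Char → List Char
  | 0, _, base36 => base36
  | f + 1, n, base36 =>
    if n ≠ 0 then
      pvALoop cs f (PySem.Int.floordiv n cs.length)
        (pvCharAt cs (PySem.Int.mod n cs.length) ++ base36)
    else base36

def base36encode (number : Int) (alphabet : String) : String :=
  let cs := alphabet.toList
  let sign : List Char := if number < 0 then ['-'] else []
  let n : Int := if number < 0 then -number else number
  if 0 ≤ n ∧ n < (cs.length : Int) then
    String.ofList (sign ++ pvCharAt cs n)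
  else
    String.ofList (sign ++ pvALoop cs (n.natAbs + 1) n [])

-- ===== PORT B =====
-- B's recursion (fuel only for totality; B's Python recursion terminates whenever Pre_ holds)
def pvBRec (cs : List Char) : Nat → Int → List Char
  | 0, _ => []
  | f + 1, n =>
    if n < 0 then '-' :: pvBRec cs f (-n)
    else if n < (cs.length : Int) then pvCharAt cs n
    else pvBRec cs f (PySem.Int.floordiv n cs.length) ++ pvCharAt cs (PySem.Int.mod n cs.length)

def base36encode_alt (number : Int) (alphabet : String) : String :=
  String.ofList (pvBRec alphabet.toList (number.natAbs + 2) number)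

-- ===== PRECONDITION & SPEC =====
-- Pre_ excludes alphabets of length ≤ 1: there A diverges (length 1, nonzero number) or raises
-- ZeroDivisionError (length 0, nonzero number); the only excluded input where A returns is
-- (0, ''), where A returns '' and B raises ZeroDivisionError.
def Pre_base36encode (number : Int) (alphabet : String) : Prop :=
  2 ≤ alphabet.toList.length ∨ (number = 0 ∧ alphabet.toList.length = 1)
instance (number : Int) (alphabet : String) : Decidable (Pre_base36encode number alphabet) := by
  unfold Pre_base36encode; infer_instance

def pvWitness_base36encode : Int × String := (35, "0123456789ABCDEFGHIJKLMNOPQRSTUVWXYZ")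

def Spec_base36encode (number : Int) (alphabet : String) (out : String) : Prop :=
  out = base36encode_alt number alphabet
instance (number : Int) (alphabet : String) (out : String) : Decidable (Spec_base36encode number alphabet out) := by
  unfold Spec_base36encode; infer_instance

-- ===== CLAIM (what is proved, stated in full; the proofs are below) =====
def Claim_equal_base36encode : Prop := ∀ (number : Int) (alphabet : String), Dom_base36encode number alphabet → Pre_base36encode number alphabet → Spec_base36encode number alphabet (base36encode number alphabet)

-- ===== LEMMAS AND PROOFS =====

-- canonical digit string of m (most significant first), with fuel
def pvDig (cs : List Char) : Nat → Nat → List Char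
  | 0, _ => []
  | f + 1, m =>
    if m = 0 then []
    else pvDig cs f (m / cs.length) ++ pvCharAt cs ((m % cs.length : Nat) : Int)

lemma pvDig_zero (cs : List Char) (f : Nat) : pvDig cs f 0 = [] := by
  cases f <;> simp [pvDig]

lemma pvDig_step (cs : List Char) (f m : Nat) (hm : m ≠ 0) :
    pvDig cs (f + 1) m = pvDig cs f (m / cs.length) ++ pvCharAt cs ((m % cs.length : Nat) : Int) := by
  simp only [pvDig]; rw [if_neg hm]

lemma pvDig_fuel (cs : List Char) (hL : 2 ≤ cs.length) :
    ∀ (m f f' : Nat), m < f → m < f' → pvDig cs f m = pvDig cs f' m := by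
  intro m
  induction m using Nat.strong_induction_on with
  | _ m ih =>
    intro f f' hf hf'
    obtain ⟨k, rfl⟩ : ∃ k, f = k + 1 := ⟨f - 1, by omega⟩
    obtain ⟨k', rfl⟩ : ∃ k', f' = k' + 1 := ⟨f' - 1, by omega⟩
    by_cases hm : m = 0
    · simp [pvDig, hm]
    · have hdiv : m / cs.length < m := Nat.div_lt_self (by omega) (by omega)
      rw [pvDig_step cs k m hm, pvDig_step cs k' m hm,
        ih (m / cs.length) hdiv k k' (by omega) (by omega)]

lemma pvALoop_eq (cs : List Char) (hL : 2 ≤ cs.length) :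
    ∀ (f : Nat) (n : Int) (acc : List Char), 0 ≤ n → n.natAbs < f →
      pvALoop cs f n acc = pvDig cs f n.natAbs ++ acc := by
  intro f
  induction f with
  | zero => intro n acc _ h; omega
  | succ k ih =>
    intro n acc hn hf
    by_cases h0 : n = 0
    · simp [pvALoop, pvDig, h0]
    · have hrepr : n = ((n.natAbs : Nat) : Int) := by omega
      have hq : PySem.Int.floordiv n (cs.length : Int) = ((n.natAbs / cs.length : Nat) : Int) := by
        rw [hrepr]; exact PySem.Int.floordiv_natCast _ _
      have hr : PySem.Int.mod n (cs.length : Int) = ((n.natAbs % cs.length : Nat) : Int) := by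
        rw [hrepr]; exact PySem.Int.mod_natCast _ _
      have hdiv : n.natAbs / cs.length < n.natAbs := Nat.div_lt_self (by omega) (by omega)
      have key := ih ((n.natAbs / cs.length : Nat) : Int)
        (pvCharAt cs ((n.natAbs % cs.length : Nat) : Int) ++ acc)
        (by positivity) (by simp only [Int.natAbs_natCast]; omega)
      simp only [pvALoop, h0, ne_eq, not_false_eq_true, if_true, hq, hr, key,
        Int.natAbs_natCast]
      rw [pvDig_step cs k n.natAbs (by omega), List.append_assoc]

lemma pvBRec_eq (cs : List Char) (hL : 2 ≤ cs.length) :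
    ∀ (f : Nat) (n : Int), 1 ≤ n → n.natAbs < f →
      pvBRec cs f n = pvDig cs (n.natAbs + 1) n.natAbs := by
  intro f
  induction f with
  | zero => intro n _ h; omega
  | succ k ih =>
    intro n hn hf
    have hneg : ¬ n < 0 := by omega
    have hrepr : n = ((n.natAbs : Nat) : Int) := by omega
    have hnz : n.natAbs ≠ 0 := by omega
    by_cases hsmall : n < (cs.length : Int)
    · -- single digit: n / len = 0 and n % len = n, so the canonical form is just alphabet[n]
      have h1 : n.natAbs / cs.length = 0 := Nat.div_eq_of_lt (by omega)
      have h2 : n.natAbs % cs.length = n.natAbs := Nat.mod_eq_of_lt (by omega)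
      simp only [pvBRec, hneg, if_false, hsmall, if_true]
      rw [pvDig_step cs n.natAbs n.natAbs hnz, h1, h2, pvDig_zero, List.nil_append, ← hrepr]
    · have hq : PySem.Int.floordiv n (cs.length : Int) = ((n.natAbs / cs.length : Nat) : Int) := by
        rw [hrepr]; exact PySem.Int.floordiv_natCast _ _
      have hr : PySem.Int.mod n (cs.length : Int) = ((n.natAbs % cs.length : Nat) : Int) := by
        rw [hrepr]; exact PySem.Int.mod_natCast _ _
      have hdiv : n.natAbs / cs.length < n.natAbs := Nat.div_lt_self (by omega) (by omega)
      have hq1 : 1 ≤ n.natAbs / cs.length := by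
        have hle : (cs.length : Int) ≤ n := by omega
        exact (Nat.one_le_div_iff (by omega)).mpr (by omega)
      have key := ih ((n.natAbs / cs.length : Nat) : Int)
        (by exact_mod_cast hq1) (by simp only [Int.natAbs_natCast]; omega)
      simp only [pvBRec, hneg, if_false, hsmall, hq, hr, key, Int.natAbs_natCast]
      rw [pvDig_step cs n.natAbs n.natAbs hnz]
      congr 1
      exact pvDig_fuel cs hL _ _ _ (by omega) hdiv

-- ===== VERDICT (by name: the statement is the Claim_ definition above) =====
theorem base36encode_spec : Claim_equal_base36encode := by
  intro number alphabet _ hPre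
  unfold Spec_base36encode base36encode base36encode_alt
  set cs := alphabet.toList with hcs
  rcases hPre with hL | ⟨hz, h1⟩
  · -- 2 ≤ len(alphabet)
    obtain ⟨f, hf⟩ : ∃ f, number.natAbs + 2 = f + 1 := ⟨number.natAbs + 1, rfl⟩
    rw [hf]
    by_cases hneg : number < 0
    · -- negative: A sets sign = '-' and works on -number; B peels '-' and recurses on -number
      have hn1 : 1 ≤ -number := by omega
      simp only [if_pos hneg, pvBRec]
      by_cases hsmall : -number < (cs.length : Int)
      · rw [if_pos (⟨by omega, hsmall⟩ : (0:Int) ≤ -number ∧ -number < (cs.length : Int))]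
        obtain ⟨f', hf'⟩ : ∃ f', f = f' + 1 := ⟨f - 1, by omega⟩
        rw [hf']
        simp only [pvBRec, show ¬ (-number < 0) by omega, if_false, if_pos hsmall]
        rfl
      · rw [if_neg (by intro h; exact hsmall h.2)]
        rw [pvALoop_eq cs hL _ _ _ (by omega) (by simp only [Int.natAbs_neg]; omega),
            pvBRec_eq cs hL f (-number) hn1 (by simp only [Int.natAbs_neg]; omega)]
        simp
    · -- nonnegative
      simp only [if_neg hneg, pvBRec]
      by_cases hsmall : number < (cs.length : Int)
      · rw [if_pos (⟨by omega, hsmall⟩ : (0:Int) ≤ number ∧ number < (cs.length : Int)),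
            if_pos hsmall]
        rfl
      · have hn1 : 1 ≤ number := by
          have h2 : (2:Int) ≤ (cs.length : Int) := by exact_mod_cast hL
          omega
        rw [if_neg (by intro h; exact hsmall h.2), if_neg hsmall]
        have hqr : PySem.Int.floordiv number (cs.length : Int)
              = ((number.natAbs / cs.length : Nat) : Int)
            ∧ PySem.Int.mod number (cs.length : Int)
              = ((number.natAbs % cs.length : Nat) : Int) := by
          have hrepr : number = ((number.natAbs : Nat) : Int) := by omega
          constructor
          · rw [hrepr]; exact PySem.Int.floordiv_natCast _ _
          · rw [hrepr]; exact PySem.Int.mod_natCast _ _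
        -- both sides are the canonical digit string: reuse pvBRec's unfolding backwards
        have hB : pvBRec cs (f + 1) number = pvDig cs (number.natAbs + 1) number.natAbs :=
          pvBRec_eq cs hL (f + 1) number hn1 (by omega)
        simp only [pvBRec, if_neg hneg, if_neg hsmall] at hB
        rw [hB, pvALoop_eq cs hL _ _ _ (by omega) (by omega)]
        simp
  · -- number = 0, len(alphabet) = 1: both return alphabet[0]
    subst hz
    rw [← hcs] at h1
    obtain ⟨c, hc⟩ : ∃ c, cs = [c] := by
      cases hx : cs with
      | nil => rw [hx] at h1; simp at h1
      | cons a t =>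
        rw [hx] at h1; simp at h1
        exact ⟨a, by rw [h1]⟩
    rw [hc]
    simp [pvBRec, pvCharAt, PySem.List.pyGet?]
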